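-- pv_equiv track=rewrite | github.com/edmundduck/pfims | server_code/ServerUtils/HelperModule.py | upper_dict_keys
-- ===== SOURCE A (Python) =====
-- def upper_dict_keys(rows, key_list=None):
--     """
--     Change the key(s) in a dict to be upper case.
--
--     If key_list is None, then all keys in a dict will be changed to upper case, otherwise only change those found in key_list.
--
--     Parameters:
--         key_list (list): List of key requiring to be upper case.
--
--     Returns:
--         result (list of dict): List of dict containing keys in upper case.
--     """
--     DL = {}
--     for k in rows[0].keys():
--         if k.upper() in key_list or not key_list:
--             DL[k.upper()] = [row[k] for row in rows]
--         else:
--             DL[k] = [row[k] for row in rows]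
--     result = [dict(zip(DL, col)) for col in zip(*DL.values())]
--     return result
-- ===== SOURCE B (Python) =====
-- def upper_dict_keys(rows, key_list=None):
--     """Row-wise rebuild: map the keys once, then one pass over rows (no columnar transpose)."""
--     new_keys = [(k.upper() if (k.upper() in key_list or not key_list) else k, k)
--                 for k in rows[0].keys()]
--     result = []
--     for row in rows:
--         result.append({nk: row[k] for nk, k in new_keys})
--     return result
-- ===== Notes on version B (the rewrite author's own statement) =====
-- stated objective: simpler
-- what changed: Drops the columnar DL dict and the zip(*) transpose: B maps the keys of rows[0] once and then builds each output dict directly in one row-wise pass over rows.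
-- intended difference: On non-empty rows whose first row is an empty dict, A's zip(*) over zero columns collapses the result to [] while B returns one empty dict per row, which preserves the row count as intended. — e.g. on upper_dict_keys([[]], some []): A returns [], B returns [[]]
import Mathlib
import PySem

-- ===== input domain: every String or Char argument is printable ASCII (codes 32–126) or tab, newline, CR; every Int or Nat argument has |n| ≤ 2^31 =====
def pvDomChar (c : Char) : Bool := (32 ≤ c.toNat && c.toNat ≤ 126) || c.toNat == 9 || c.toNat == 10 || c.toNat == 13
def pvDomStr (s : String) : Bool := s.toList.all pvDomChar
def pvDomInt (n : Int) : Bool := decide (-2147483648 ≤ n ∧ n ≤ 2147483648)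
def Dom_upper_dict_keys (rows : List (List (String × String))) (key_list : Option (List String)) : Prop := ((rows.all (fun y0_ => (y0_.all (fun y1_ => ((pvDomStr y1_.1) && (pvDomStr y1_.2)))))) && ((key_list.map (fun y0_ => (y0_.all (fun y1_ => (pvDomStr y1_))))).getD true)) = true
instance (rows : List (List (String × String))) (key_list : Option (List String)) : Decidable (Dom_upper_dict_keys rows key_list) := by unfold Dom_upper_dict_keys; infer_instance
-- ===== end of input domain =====

-- B rebuilds each row's dict in a single row-wise pass instead of A's columnar dict + zip(*) transpose;
-- on non-empty rows whose first row is {} A collapses to [] while B keeps one empty dict per row (see D_).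

-- ===== PORT A =====
-- shared guard: Python's `k.upper() in key_list or not key_list` (truthiness of None/[]; identical text in both sources)
def pyKeyGuard (key_list : Option (List String)) (k : String) : Bool :=
  (match key_list with
   | none => false        -- `x in None` raises TypeError in Python; excluded by Pre_ whenever this branch is reached
   | some kl => kl.contains (PySem.Str.upper k))
  || (match key_list with
      | none => true
      | some kl => kl.isEmpty)

-- zip(*lists) : transpose truncated to the shortest list (zip() of no lists is empty)
def pyZipStar (ls : List (List String)) : List (List String) :=
  (List.range (((ls.map List.length).min?).getD 0)).map (fun i => ls.map (fun t => t.getD i ""))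

def upper_dict_keys (rows : List (List (String × String))) (key_list : Option (List String)) : List (List (String × String)) :=
  let DL : PySem.Dict String (List String) :=
    ((rows.headD []).map (·.1)).foldl
      (fun d k =>
        if pyKeyGuard key_list k then
          d.insert (PySem.Str.upper k) (rows.map (fun row => (PySem.Dict.mk row).getD k ""))
        else
          d.insert k (rows.map (fun row => (PySem.Dict.mk row).getD k "")))
      PySem.Dict.empty
  (pyZipStar DL.values).map (fun col =>
    ((DL.keys.zip col).foldl (fun d p => d.insert p.1 p.2) PySem.Dict.empty).items)

-- ===== PORT B =====
def upper_dict_keys_alt (rows : List (List (String × String))) (key_list : Option (List String)) : List (List (String × String)) :=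
  rows.map (fun row =>
    ((((rows.headD []).map (·.1)).map
        (fun k => (if pyKeyGuard key_list k then PySem.Str.upper k else k, k))).foldl
      (fun d p => d.insert p.1 ((PySem.Dict.mk row).getD p.2 ""))
      PySem.Dict.empty).items)

-- ===== PRECONDITION & SPEC =====
-- Pre_ excludes exactly the inputs where Python A raises: empty rows (IndexError on rows[0]),
-- key_list=None with a non-empty first row (TypeError from `in None`), and rows missing a key of rows[0] (KeyError).
def Pre_upper_dict_keys (rows : List (List (String × String))) (key_list : Option (List String)) : Prop :=
  rows ≠ [] ∧ (key_list ≠ none ∨ rows.headD [] = []) ∧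
  ∀ row ∈ rows, ∀ p ∈ rows.headD ([] : List (String × String)), (PySem.Dict.mk row).contains p.1 = true
instance (rows : List (List (String × String))) (key_list : Option (List String)) : Decidable (Pre_upper_dict_keys rows key_list) := by unfold Pre_upper_dict_keys; infer_instance
def pvWitness_upper_dict_keys : (List (List (String × String))) × Option (List String) :=
  ([[("a", "1"), ("b", "2")], [("a", "3"), ("b", "4")]], some ["A"])

-- On non-empty rows whose first row is an empty dict, A's zip(*) over zero columns returns [] while B
-- returns one empty dict per row, which preserves the row count as intended.
def D_upper_dict_keys (rows : List (List (String × String))) (key_list : Option (List String)) : Prop :=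
  rows ≠ [] ∧ rows.headD [] = ([] : List (String × String))
instance (rows : List (List (String × String))) (key_list : Option (List String)) : Decidable (D_upper_dict_keys rows key_list) := by unfold D_upper_dict_keys; infer_instance

def Spec_upper_dict_keys (rows : List (List (String × String))) (key_list : Option (List String)) (out : List (List (String × String))) : Prop := ¬ D_upper_dict_keys rows key_list → out = upper_dict_keys_alt rows key_list
instance (rows : List (List (String × String))) (key_list : Option (List String)) (out : List (List (String × String))) : Decidable (Spec_upper_dict_keys rows key_list out) := by unfold Spec_upper_dict_keys; infer_instance

def pvDiffWitness_upper_dict_keys : (List (List (String × String))) × Option (List String) :=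
  ([[]], some [])
def pvDiffWitnessOut_upper_dict_keys : (List (List (String × String))) × (List (List (String × String))) :=
  ([], [[]])

-- ===== CLAIM =====
def Claim_unchanged_upper_dict_keys : Prop := ∀ (rows : List (List (String × String))) (key_list : Option (List String)), Dom_upper_dict_keys rows key_list → Pre_upper_dict_keys rows key_list → Spec_upper_dict_keys rows key_list (upper_dict_keys rows key_list)
def Claim_changed_upper_dict_keys : Prop := Dom_upper_dict_keys (pvDiffWitness_upper_dict_keys.1) (pvDiffWitness_upper_dict_keys.2) ∧ Pre_upper_dict_keys (pvDiffWitness_upper_dict_keys.1) (pvDiffWitness_upper_dict_keys.2) ∧ D_upper_dict_keys (pvDiffWitness_upper_dict_keys.1) (pvDiffWitness_upper_dict_keys.2) ∧ upper_dict_keys (pvDiffWitness_upper_dict_keys.1) (pvDiffWitness_upper_dict_keys.2) = pvDiffWitnessOut_upper_dict_keys.1 ∧ upper_dict_keys_alt (pvDiffWitness_upper_dict_keys.1) (pvDiffWitness_upper_dict_keys.2) = pvDiffWitnessOut_upper_dict_keys.2 ∧ pvDiffWitnessOut_upper_dict_keys.1 ≠ pvDiffWitnessOut_upper_dict_keys.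2
def Claim_exact_upper_dict_keys : Prop := ∀ (rows : List (List (String × String))) (key_list : Option (List String)), Dom_upper_dict_keys rows key_list → Pre_upper_dict_keys rows key_list → D_upper_dict_keys rows key_list → upper_dict_keys rows key_list ≠ upper_dict_keys_alt rows key_list

-- ===== LEMMAS AND PROOFS =====

lemma items_insert_map {β γ : Type} (g : β → γ) (d₁ : PySem.Dict String β) (d₂ : PySem.Dict String γ)
    (h : d₂.items = d₁.items.map (fun p => (p.1, g p.2))) (k : String) (x : β) :
    (d₂.insert k (g x)).items = (d₁.insert k x).items.map (fun p => (p.1, g p.2)) := by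
  have hc : d₂.contains k = d₁.contains k := by
    show d₂.items.any (fun p => p.1 == k) = d₁.items.any (fun p => p.1 == k)
    rw [h]; simp [List.any_map]; rfl
  rw [PySem.Dict.items_insert, PySem.Dict.items_insert, hc]
  split_ifs with hck
  · rw [h, List.map_map, List.map_map]
    apply List.map_congr_left; intro p hp
    by_cases hpk : p.1 == k <;> simp [hpk, Function.comp]
  · rw [h]; simp

lemma items_fold_insert_map {β γ : Type} (g : β → γ) (t : String → String) (v₁ : String → β) (v₂ : String → γ)
    (hv : ∀ k, v₂ k = g (v₁ k)) :
    ∀ (keys : List String) (d₁ : PySem.Dict String β) (d₂ : PySem.Dict String γ),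
    d₂.items = d₁.items.map (fun p => (p.1, g p.2)) →
    (keys.foldl (fun d k => d.insert (t k) (v₂ k)) d₂).items
      = (keys.foldl (fun d k => d.insert (t k) (v₁ k)) d₁).items.map (fun p => (p.1, g p.2))
  | [], _, _, h => h
  | k :: ks, d₁, d₂, h => by
      simp only [List.foldl_cons]
      exact items_fold_insert_map g t v₁ v₂ hv ks _ _
        (by rw [hv k]; exact items_insert_map g d₁ d₂ h (t k) (v₁ k))

lemma mem_values_fold {β : Type} (t : String → String) (v : String → β) :
    ∀ (keys : List String) (d : PySem.Dict String β) (w : β),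
    w ∈ (keys.foldl (fun d k => d.insert (t k) (v k)) d).values → w ∈ d.values ∨ ∃ k, w = v k
  | [], d, w, h => Or.inl h
  | k :: ks, d, w, h => by
      simp only [List.foldl_cons] at h
      rcases mem_values_fold t v ks _ w h with h' | h'
      · rcases PySem.Dict.mem_values_insert _ _ _ _ h' with h'' | h''
        · exact Or.inr ⟨k, h''⟩
        · exact Or.inl h''
      · exact Or.inr h'

lemma foldl_min_const : ∀ (l : List Nat) (n : Nat), (∀ x ∈ l, x = n) → l.foldl min n = n
  | [], _, _ => rfl
  | a :: t, n, h => by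
      have : a = n := h a (by simp)
      simp only [List.foldl_cons, this, min_self]
      exact foldl_min_const t n (fun x hx => h x (by simp [hx]))

lemma min?_all_eq (l : List Nat) (n : Nat) (hne : l ≠ []) (h : ∀ x ∈ l, x = n) : l.min? = some n := by
  cases l with
  | nil => exact absurd rfl hne
  | cons a t =>
      have ha : a = n := h a (by simp)
      simp only [List.min?, ha]
      rw [foldl_min_const t n (fun x hx => h x (by simp [hx]))]

lemma fold_if_body (key_list : Option (List String)) {β : Type} (f : String → β) :
    (fun (d : PySem.Dict String β) k =>
        if pyKeyGuard key_list k then d.insert (PySem.Str.upper k) (f k) else d.insert k (f k))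
      = (fun d k => d.insert (if pyKeyGuard key_list k then PySem.Str.upper k else k) (f k)) := by
  funext d k; split_ifs <;> rfl

-- ===== VERDICT =====


lemma core (t : String → String) (keys : List String) (rows : List (List (String × String)))
    (hkne : keys ≠ []) :
    (pyZipStar (keys.foldl
        (fun d k => d.insert (t k) (rows.map (fun row => (PySem.Dict.mk row).getD k "")))
        PySem.Dict.empty).values).map (fun col =>
      (((keys.foldl
            (fun d k => d.insert (t k) (rows.map (fun row => (PySem.Dict.mk row).getD k "")))
            PySem.Dict.empty).keys.zip col).foldl
          (fun d p => d.insert p.1 p.2) PySem.Dict.empty).items)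
    = rows.map (fun row =>
        (keys.foldl (fun d k => d.insert (t k) ((PySem.Dict.mk row).getD k ""))
          PySem.Dict.empty).items) := by
  set n := rows.length with hn
  set v : String → List String := fun k => rows.map (fun row => (PySem.Dict.mk row).getD k "") with hv
  set DL : PySem.Dict String (List String) :=
    keys.foldl (fun d k => d.insert (t k) (v k)) PySem.Dict.empty with hDL
  -- every value of DL has length n
  have hlen : ∀ w ∈ DL.values, w.length = n := by
    intro w hw
    rcases mem_values_fold t v keys PySem.Dict.empty w hw with h | ⟨k, hk⟩
    · exact absurd h (by simp [PySem.Dict.empty, PySem.Dict.values])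
    · simp [hk, hv, hn]
  -- DL.keys nonempty and nodup
  have hkeysDL : DL.keys = PySem.Set.ofList (keys.map t) := by
    rw [hDL, PySem.Dict.keys_foldl_insert_key]
    rw [show (PySem.Dict.empty : PySem.Dict String (List String)).keys = [] from rfl,
      PySem.Set.update_nil_left]
  have hDLkne : DL.keys ≠ [] := by
    rw [hkeysDL]
    cases hk : keys with
    | nil => exact absurd hk hkne
    | cons a l =>
      intro hemp
      rw [← hk] at hemp
      have : t a ∈ PySem.Set.ofList (keys.map t) := by
        rw [PySem.Set.mem_ofList]; simp [hk]
      rw [hemp] at this; exact absurd this (by simp)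
  have hDLnodup : DL.keys.Nodup := by
    rw [hDL]
    exact PySem.Dict.nodup_keys_foldl_insert_key keys t (fun d k => v k) PySem.Dict.empty
      (by simp [PySem.Dict.empty, PySem.Dict.keys])
  have hitems : DL.items ≠ [] := by
    intro h
    exact hDLkne (by rw [show DL.keys = DL.items.map (·.1) from rfl, h]; rfl)
  have hvals : DL.values ≠ [] := by
    intro h
    exact hitems (by rw [show DL.values = DL.items.map (·.2) from rfl] at h; simpa using h)
  -- zip(*DL.values) is a rows.length-row transpose
  have hmin : ((DL.values.map List.length).min?) = some n := by
    apply min?_all_eq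
    · simpa using hvals
    · intro x hx
      rcases List.mem_map.mp hx with ⟨w, hw, hwl⟩
      rw [← hwl]; exact hlen w hw
  have hzip : pyZipStar DL.values
      = (List.range n).map (fun i => DL.values.map (fun w => w.getD i "")) := by
    unfold pyZipStar; rw [hmin]; rfl
  rw [hzip]
  -- per-column dict(zip(DL, col)) has exactly DL's items with the i-th component of each value
  have hcol : ∀ (i : Nat),
      ((DL.keys.zip (DL.values.map (fun w => w.getD i ""))).foldl
          (fun d p => d.insert p.1 p.2) PySem.Dict.empty).items
        = DL.items.map (fun p => (p.1, p.2.getD i "")) := by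
    intro i
    have hz : DL.keys.zip (DL.values.map (fun w => w.getD i ""))
        = DL.items.map (fun p => (p.1, p.2.getD i "")) := by
      rw [show DL.keys = DL.items.map (·.1) from rfl,
        show DL.values = DL.items.map (·.2) from rfl, List.map_map]
      rw [List.zip_map']; rfl
    rw [hz]
    have hnodup : ((DL.items.map (fun p => (p.1, p.2.getD i ""))).map (·.1)).Nodup := by
      rw [List.map_map]
      exact hDLnodup
    refine (PySem.Dict.items_foldl_insert_fresh (DL.items.map (fun p => (p.1, p.2.getD i "")))
      Prod.fst Prod.snd PySem.Dict.empty (fun a _ => rfl) hnodup).trans ?_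
    simp [PySem.Dict.empty, Function.comp]
  -- compare the two result lists elementwise
  apply List.ext_getElem
  · simp [hn]
  · intro i hi1 hi2
    simp only [List.getElem_map, List.getElem_range]
    rw [hcol]
    have hilen : i < rows.length := by simpa using hi2
    exact (items_fold_insert_map (g := fun w => w.getD i "") t v
      (fun k => (PySem.Dict.mk rows[i]).getD k "")
      (fun k => by
        simp only [hv]
        rw [List.getD, List.getElem?_map]
        simp [hilen])
      keys PySem.Dict.empty PySem.Dict.empty rfl).symm

-- ===== VERDICT =====
theorem upper_dict_keys_spec : Claim_unchanged_upper_dict_keys := by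
  intro rows key_list _hdom _hpre hnd
  show upper_dict_keys rows key_list = upper_dict_keys_alt rows key_list
  by_cases hre : rows = []
  · subst hre
    simp [upper_dict_keys, upper_dict_keys_alt, pyZipStar, PySem.Dict.empty, PySem.Dict.values]
  · have hr0 : rows.headD [] ≠ [] := fun h => hnd ⟨hre, h⟩
    unfold upper_dict_keys upper_dict_keys_alt
    simp only [fold_if_body]
    refine (core (fun k => if pyKeyGuard key_list k then PySem.Str.upper k else k)
      ((rows.headD []).map (·.1)) rows (by simpa using hr0)).trans ?_
    simp only [List.foldl_map]
theorem upper_dict_keys_changed : Claim_changed_upper_dict_keys := by unfold Claim_changed_upper_dict_keys; decide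

theorem upper_dict_keys_tight : Claim_exact_upper_dict_keys := by
  intro rows key_list _hdom _hpre hd
  obtain ⟨hne, hh⟩ := hd
  have hA : upper_dict_keys rows key_list = [] := by
    unfold upper_dict_keys
    rw [hh]
    simp [pyZipStar, PySem.Dict.empty, PySem.Dict.values]
  have hB : upper_dict_keys_alt rows key_list ≠ [] := by
    unfold upper_dict_keys_alt
    simpa using hne
  rw [hA]; exact fun h => hB h.symm
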